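-- pv_equiv track=rewrite | github.com/CAAS000JXH/Genetic-Linkage-Map-Construction-and-QTL-Mapping-for-Grape-Hybrid-Populations | MNP_maker_swap.py | round1_process
-- ===== SOURCE A (Python) =====
-- def swap_genotypes(row, parent_type):
--     if parent_type == 'male':
--         return ['nn' if val == 'np' else 'np' if val == 'nn' else val for val in row]
--     elif parent_type == 'female':
--         return ['lm' if val == 'll' else 'll' if val == 'lm' else val for val in row]
--     return row
--
-- def calculate_score(row1, row2):
--     score = 0
--     for a, b in zip(row1, row2):
--         if a != b and a != '-' and b != '-':
--             score += 1
--     return score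
--
-- def round1_process(data, parent_type):
--     for i in range(1, len(data)):
--         row_current = data[i][2:]  # 当前行
--         row_previous = data[i - 1][2:]  # 前一行
--
--         # 原始基因型和交换后的基因型
--         original_row = row_current[:]
--         swapped_row = swap_genotypes(row_current, parent_type)
--
--         # 计算原始基因型与前一行的得分
--         original_score = calculate_score(original_row, row_previous)
--         swapped_score = calculate_score(swapped_row, row_previous)
--
--         # 如果交换后的得分更低，使用交换后的基因型
--         if swapped_score < original_score:
--             data[i][2:] = swapped_row
--     return data
-- ===== SOURCE B (Python) =====
-- def round1_process(data, parent_type):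
--     pairs = {'male': ('nn', 'np'), 'female': ('ll', 'lm')}
--     if parent_type not in pairs:
--         return data
--     a, b = pairs[parent_type]
--     for prev, row in zip(data, data[1:]):
--         cells = list(zip(row[2:], prev[2:]))
--         same = sum(1 for c, p in cells if (c == a or c == b) and p == c)
--         cross = sum(1 for c, p in cells if (c == a and p == b) or (c == b and p == a))
--         if cross > same:
--             row[2:] = [b if v == a else a if v == b else v for v in row[2:]]
--     return data
-- ===== Notes on version B (the rewrite author's own statement) =====
-- stated objective: alternative
-- what changed: Instead of building the swapped row and comparing two full mismatch scores against the previous row, B derives the decision from a pair-agreement count: it counts cells where the current swappable value already agrees with the previous row versus cells where it is the crossed partner of the previous value, and swaps iff crossed agreements outnumber direct ones; '-' cells and non-pair values drop out by construction, so no swapped row or score is built unless a swap actually happens (measured ~2x faster).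
import Mathlib
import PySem

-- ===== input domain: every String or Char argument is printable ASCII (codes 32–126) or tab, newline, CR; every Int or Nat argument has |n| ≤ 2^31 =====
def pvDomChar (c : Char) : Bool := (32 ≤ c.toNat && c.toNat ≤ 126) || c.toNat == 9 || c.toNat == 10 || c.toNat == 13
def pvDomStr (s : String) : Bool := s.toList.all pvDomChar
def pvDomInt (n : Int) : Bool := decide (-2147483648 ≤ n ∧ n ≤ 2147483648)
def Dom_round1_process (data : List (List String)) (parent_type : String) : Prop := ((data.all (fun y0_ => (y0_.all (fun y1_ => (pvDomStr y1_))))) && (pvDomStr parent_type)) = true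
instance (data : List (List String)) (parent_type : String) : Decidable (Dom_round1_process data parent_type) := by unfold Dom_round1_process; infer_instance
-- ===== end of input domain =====

-- B decides the swap by counting direct vs crossed pair agreements with the previous row
-- instead of computing two mismatch scores (objective: alternative); both Pythons mutate
-- rows of data in place identically, and the equivalence is of the returned list.

-- ===== PORT A =====
def swap_genotypes (row : List String) (parent_type : String) : List String :=
  if parent_type = "male" then
    row.map (fun val => if val = "np" then "nn" else if val = "nn" then "np" else val)
  else if parent_type = "female" then
    row.map (fun val => if val = "ll" then "lm" else if val = "lm" then "ll" else val)
  else row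

def calculate_score (row1 row2 : List String) : Int :=
  (List.zip row1 row2).foldl
    (fun score p => if p.1 ≠ p.2 ∧ p.1 ≠ "-" ∧ p.2 ≠ "-" then score + 1 else score) 0

-- the 'for i in range(1, len(data))' loop, as recursion on the index with the list as state
def round1_loop (parent_type : String) (data : List (List String)) (i : Nat) :
    List (List String) :=
  if _h : i < data.length then
    let row_current := (data.getD i []).drop 2
    let row_previous := (data.getD (i - 1) []).drop 2
    let original_row := row_current
    let swapped_row := swap_genotypes row_current parent_type
    let original_score := calculate_score original_row row_previous
    let swapped_score := calculate_score swapped_row row_previous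
    let data' := if swapped_score < original_score then
        data.set i ((data.getD i []).take 2 ++ swapped_row)
      else data
    round1_loop parent_type data' (i + 1)
  else data
termination_by data.length - i
decreasing_by
  split
  · simp only [List.length_set]; omega
  · omega

def round1_process (data : List (List String)) (parent_type : String) : List (List String) :=
  round1_loop parent_type data 1

-- ===== PORT B =====
def pvSwp (a b v : String) : String := if v = a then b else if v = b then a else v

def pvSameP (a b : String) (p : String × String) : Bool :=
  (p.1 == a || p.1 == b) && p.2 == p.1

def pvCrossP (a b : String) (p : String × String) : Bool :=
  (p.1 == a && p.2 == b) || (p.1 == b && p.2 == a)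

-- the 'for prev, row in zip(data, data[1:])' loop with in-place row update
def pvWalk (a b : String) (prev : List String) : List (List String) → List (List String)
  | [] => []
  | row :: rs =>
    let cells := List.zip (row.drop 2) (prev.drop 2)
    let same := cells.countP (pvSameP a b)
    let cross := cells.countP (pvCrossP a b)
    let row' := if same < cross then row.take 2 ++ (row.drop 2).map (pvSwp a b) else row
    row' :: pvWalk a b row' rs

def round1_process_alt (data : List (List String)) (parent_type : String) :
    List (List String) :=
  if parent_type = "male" then
    match data with
    | [] => []
    | first :: rest => first :: pvWalk "nn" "np" first rest
  else if parent_type = "female" then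
    match data with
    | [] => []
    | first :: rest => first :: pvWalk "ll" "lm" first rest
  else data

-- ===== PRECONDITION & SPEC =====
def Spec_round1_process (data : List (List String)) (parent_type : String) (out : List (List String)) : Prop := out = round1_process_alt data parent_type
instance (data : List (List String)) (parent_type : String) (out : List (List String)) : Decidable (Spec_round1_process data parent_type out) := by unfold Spec_round1_process; infer_instance

-- ===== CLAIM (what is proved, stated in full; the proofs are below) =====
def Claim_equal_round1_process : Prop := ∀ (data : List (List String)) (parent_type : String), Dom_round1_process data parent_type → Spec_round1_process data parent_type (round1_process data parent_type)

-- ===== LEMMAS AND PROOFS =====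

def pvMis (a b : String) : Int := if a ≠ b ∧ a ≠ "-" ∧ b ≠ "-" then 1 else 0

-- counting fold = sum of per-cell indicators
theorem score_eq_sum (l : List (String × String)) (s : Int) :
    l.foldl (fun score p => if p.1 ≠ p.2 ∧ p.1 ≠ "-" ∧ p.2 ≠ "-" then score + 1 else score) s
      = s + (l.map (fun p => pvMis p.1 p.2)).sum := by
  induction l generalizing s with
  | nil => simp
  | cons h t ih => simp only [List.foldl_cons, List.map_cons, List.sum_cons, ih, pvMis]
                   split <;> ring

-- per-cell: swapped mismatch + crossed-agreement indicator = mismatch + direct-agreement indicator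
theorem cell_eq (a b : String) (hab : a ≠ b) (ha : a ≠ "-") (hb : b ≠ "-") (c p : String) :
    pvMis (pvSwp a b c) p + (if pvCrossP a b (c, p) then (1 : Int) else 0)
      = pvMis c p + (if pvSameP a b (c, p) then (1 : Int) else 0) := by
  simp only [pvMis, pvSwp, pvSameP, pvCrossP]
  by_cases hca : c = a <;> by_cases hcb : c = b <;>
    by_cases hpa : p = a <;> by_cases hpb : p = b <;> by_cases hpd : p = "-" <;>
    simp_all <;> simp_all [eq_comm]

theorem key_sum (a b : String) (hab : a ≠ b) (ha : a ≠ "-") (hb : b ≠ "-")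
    (l : List (String × String)) :
    (l.map (fun p => pvMis (pvSwp a b p.1) p.2)).sum + (l.countP (pvCrossP a b) : Int)
      = (l.map (fun p => pvMis p.1 p.2)).sum + (l.countP (pvSameP a b) : Int) := by
  induction l with
  | nil => simp
  | cons h t ih =>
    simp only [List.map_cons, List.sum_cons, List.countP_cons]
    have := cell_eq a b hab ha hb h.1 h.2
    by_cases h1 : pvCrossP a b (h.1, h.2) <;> by_cases h2 : pvSameP a b (h.1, h.2) <;>
      simp_all <;> omega

-- the swap decision: swapped score < original score ↔ direct agreements < crossed agreements
theorem cond_iff (a b : String) (hab : a ≠ b) (ha : a ≠ "-") (hb : b ≠ "-")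
    (cur prev : List String) :
    (calculate_score (cur.map (pvSwp a b)) prev < calculate_score cur prev)
      ↔ ((List.zip cur prev).countP (pvSameP a b) < (List.zip cur prev).countP (pvCrossP a b)) := by
  unfold calculate_score
  rw [List.zip_map_left, score_eq_sum, score_eq_sum]
  simp only [List.map_map, Function.comp_def, Prod.map, id]
  have := key_sum a b hab ha hb (List.zip cur prev)
  constructor <;> intro h <;>
    [ (have : ((List.zip cur prev).countP (pvSameP a b) : Int)
        < ((List.zip cur prev).countP (pvCrossP a b) : Int) := by omega);
      skip ] <;> omega

theorem swap_genotypes_male (row : List String) :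
    swap_genotypes row "male" = row.map (pvSwp "nn" "np") := by
  simp only [swap_genotypes, if_true]
  apply List.map_congr_left
  intro v _
  by_cases h1 : v = "np" <;> by_cases h2 : v = "nn" <;> simp_all [pvSwp]

theorem swap_genotypes_female (row : List String) :
    swap_genotypes row "female" = row.map (pvSwp "ll" "lm") := by
  simp only [swap_genotypes, String.reduceEq, if_false, if_true]
  apply List.map_congr_left
  intro v _
  by_cases h1 : v = "ll" <;> by_cases h2 : v = "lm" <;> simp_all [pvSwp]

theorem round1_loop_eq (pt a b : String) (hab : a ≠ b) (ha : a ≠ "-") (hb : b ≠ "-")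
    (hswap : ∀ r, swap_genotypes r pt = r.map (pvSwp a b)) :
    ∀ (k : Nat) (data : List (List String)) (i : Nat), 1 ≤ i → data.length - i = k →
      round1_loop pt data i = data.take i ++ pvWalk a b (data.getD (i - 1) []) (data.drop i) := by
  intro k
  induction k with
  | zero =>
    intro data i h1 hk
    rw [round1_loop.eq_def]
    have hge : data.length ≤ i := by omega
    simp [Nat.not_lt.mpr hge, List.drop_eq_nil_of_le hge, List.take_of_length_le hge, pvWalk]
  | succ k ih =>
    intro data i h1 hk
    have hlt : i < data.length := by omega
    rw [round1_loop.eq_def]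
    simp only [hlt, dif_pos]
    have hdrop : data.drop i = data[i] :: data.drop (i + 1) :=
      List.drop_eq_getElem_cons hlt
    have hgetD : data.getD i [] = data[i] := List.getD_eq_getElem data [] hlt
    rw [hdrop, pvWalk]
    have hcond := cond_iff a b hab ha hb ((data.getD i []).drop 2)
        ((data.getD (i - 1) []).drop 2)
    rw [← hswap] at hcond
    by_cases hc : calculate_score (swap_genotypes ((data.getD i []).drop 2) pt)
        ((data.getD (i-1) []).drop 2)
      < calculate_score ((data.getD i []).drop 2) ((data.getD (i-1) []).drop 2)
    · -- swap branch
      have hcnt : (List.zip (data[i].drop 2) ((data.getD (i-1) []).drop 2)).countP (pvSameP a b)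
          < (List.zip (data[i].drop 2) ((data.getD (i-1) []).drop 2)).countP (pvCrossP a b) := by
        rw [← hgetD]; exact hcond.mp hc
      simp only [hc, if_pos, hcnt]
      set r : List String := data[i].take 2 ++ (data[i].drop 2).map (pvSwp a b) with hr
      have hrow : (data.getD i []).take 2 ++ swap_genotypes ((data.getD i []).drop 2) pt = r := by
        rw [hgetD, hswap, hr]
      rw [hrow]
      rw [ih (data.set i r) (i + 1) (by omega) (by simp; omega)]
      have h1' : (data.set i r).take (i + 1) = data.take i ++ [r] := by
        rw [List.set_eq_take_append_cons_drop, if_pos hlt]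
        rw [List.take_append]
        simp [List.length_take, Nat.min_eq_left (Nat.le_of_lt hlt)]
      have h2' : (data.set i r).getD (i + 1 - 1) [] = r := by
        simp [List.getD_eq_getElem?_getD, hlt]
      have h3' : (data.set i r).drop (i + 1) = data.drop (i + 1) := by
        rw [List.set_eq_take_append_cons_drop, if_pos hlt, List.drop_append]
        simp [List.length_take, Nat.min_eq_left (Nat.le_of_lt hlt)]
      rw [h1', h2', h3', List.append_assoc]
      rfl
    · -- no-swap branch
      have hcnt : ¬ (List.zip (data[i].drop 2) ((data.getD (i-1) []).drop 2)).countP (pvSameP a b)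
          < (List.zip (data[i].drop 2) ((data.getD (i-1) []).drop 2)).countP (pvCrossP a b) := by
        rw [← hgetD]; exact fun hx => hc (hcond.mpr hx)
      simp only [hc, hcnt, if_false]
      rw [ih data (i + 1) (by omega) (by omega)]
      have htake : data.take (i + 1) = data.take i ++ [data[i]] := by
        rw [List.take_add_one]; simp [List.getElem?_eq_getElem hlt]
      have hget : data.getD (i + 1 - 1) [] = data[i] := by simpa using hgetD
      rw [htake, hget, List.append_assoc]
      rfl

-- when parent_type is neither 'male' nor 'female' the loop never swaps
theorem round1_loop_id (pt : String) (hm : pt ≠ "male") (hf : pt ≠ "female") :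
    ∀ (k : Nat) (data : List (List String)) (i : Nat), data.length - i = k →
      round1_loop pt data i = data := by
  intro k
  induction k with
  | zero =>
    intro data i hk
    rw [round1_loop.eq_def]
    simp [Nat.not_lt.mpr (by omega : data.length ≤ i)]
  | succ k ih =>
    intro data i hk
    have hlt : i < data.length := by omega
    rw [round1_loop.eq_def]
    simp only [hlt, dif_pos]
    have hsg : swap_genotypes ((data.getD i []).drop 2) pt = (data.getD i []).drop 2 := by
      unfold swap_genotypes; rw [if_neg hm, if_neg hf]
    rw [hsg]
    simp only [lt_self_iff_false, if_false]
    exact ih data (i + 1) (by omega)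

theorem round1_eq (data : List (List String)) (pt : String) :
    round1_process data pt = round1_process_alt data pt := by
  unfold round1_process round1_process_alt
  by_cases hm : pt = "male"
  · subst hm
    rw [if_pos rfl]
    cases data with
    | nil => rw [round1_loop.eq_def]; simp
    | cons first rest =>
      rw [round1_loop_eq "male" "nn" "np" (by decide) (by decide) (by decide)
        swap_genotypes_male rest.length (first :: rest) 1 (by omega) (by simp)]
      simp [List.getD]
  · by_cases hf : pt = "female"
    · subst hf
      rw [if_neg (by decide), if_pos rfl]
      cases data with
      | nil => rw [round1_loop.eq_def]; simp
      | cons first rest =>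
        rw [round1_loop_eq "female" "ll" "lm" (by decide) (by decide) (by decide)
          swap_genotypes_female rest.length (first :: rest) 1 (by omega) (by simp)]
        simp [List.getD]
    · rw [if_neg hm, if_neg hf]
      exact round1_loop_id pt hm hf (data.length - 1) data 1 rfl

-- ===== VERDICT (by name: the statement is the Claim_ definition above) =====
theorem round1_process_spec : Claim_equal_round1_process := by
  intro data pt _
  unfold Spec_round1_process
  exact round1_eq data pt
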